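-- pv_equiv track=rewrite | github.com/pranavnbapat/data-prep-opensearch | stages/enricher/utils.py | _path_has_dangerous_extension
-- ===== SOURCE A (Python) =====
-- _DANGEROUS_EXTENSIONS = {
--     ".exe", ".msi", ".bat", ".cmd", ".ps1", ".vbs", ".dll",
--     ".pkg", ".dmg", ".app",
--     ".deb", ".rpm", ".appimage", ".sh", ".run",
--     ".jar", ".py", ".pyz", ".pyc",
--     ".scr", ".com", ".pif", ".msix", ".msixbundle", ".reg",
--     ".iso", ".img", ".bin", ".apk", ".ipa",
--     ".zip", ".rar", ".7z", ".tar", ".gz", ".bz2", ".xz", ".tgz", ".tbz2", ".txz",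
-- }
--
-- _LEGACY_WEBPAGE_EXTENSIONS = {".php", ".cgi", ".jsp", ".asp", ".aspx", ".cfm"}
--
-- def _path_has_dangerous_extension(path: str) -> bool:
--     p = (path or "").strip().lower()
--     if not p:
--         return False
--     for ext in _LEGACY_WEBPAGE_EXTENSIONS:
--         if p.endswith(ext):
--             return False
--     return any(p.endswith(ext) for ext in _DANGEROUS_EXTENSIONS)
-- ===== SOURCE B (Python) =====
-- _DANGEROUS_EXTENSIONS = {
--     ".exe", ".msi", ".bat", ".cmd", ".ps1", ".vbs", ".dll",
--     ".pkg", ".dmg", ".app",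
--     ".deb", ".rpm", ".appimage", ".sh", ".run",
--     ".jar", ".py", ".pyz", ".pyc",
--     ".scr", ".com", ".pif", ".msix", ".msixbundle", ".reg",
--     ".iso", ".img", ".bin", ".apk", ".ipa",
--     ".zip", ".rar", ".7z", ".tar", ".gz", ".bz2", ".xz", ".tgz", ".tbz2", ".txz",
-- }
--
-- def _path_has_dangerous_extension(path: str) -> bool:
--     p = (path or "").strip().lower()
--     if not p:
--         return False
--     i = p.rfind(".")
--     ext = p[i:] if i >= 0 else ""
--     return ext in _DANGEROUS_EXTENSIONS
-- ===== Notes on version B (the rewrite author's own statement) =====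
-- stated objective: simpler
-- what changed: B extracts the trailing extension once (rfind of the dot character, then one slice) and does a single set-membership test, replacing A's legacy-extension loop plus up to ~40 endswith scans (the legacy set is disjoint from the dangerous set, so dropping the loop preserves the result).
import Mathlib
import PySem

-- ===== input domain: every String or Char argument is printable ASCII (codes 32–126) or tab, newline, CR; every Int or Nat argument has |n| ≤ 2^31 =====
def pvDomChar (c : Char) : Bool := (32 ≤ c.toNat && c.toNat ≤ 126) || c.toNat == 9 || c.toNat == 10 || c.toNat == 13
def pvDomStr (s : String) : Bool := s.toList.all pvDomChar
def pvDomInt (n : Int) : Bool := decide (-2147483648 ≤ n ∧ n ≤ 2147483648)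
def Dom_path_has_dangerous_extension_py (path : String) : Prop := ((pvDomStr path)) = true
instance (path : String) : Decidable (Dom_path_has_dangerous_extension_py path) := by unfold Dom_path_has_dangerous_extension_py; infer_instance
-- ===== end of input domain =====

-- B replaces A's legacy loop plus ~40 endswith scans by one rfind-based extension extraction and a single
-- set-membership test; same result on every input (the legacy set is disjoint from the dangerous set).

-- the two module-level extension sets (Python set literals, kept in source order)
def pyDangerousExts : List String :=
  [".exe", ".msi", ".bat", ".cmd", ".ps1", ".vbs", ".dll",
   ".pkg", ".dmg", ".app",
   ".deb", ".rpm", ".appimage", ".sh", ".run",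
   ".jar", ".py", ".pyz", ".pyc",
   ".scr", ".com", ".pif", ".msix", ".msixbundle", ".reg",
   ".iso", ".img", ".bin", ".apk", ".ipa",
   ".zip", ".rar", ".7z", ".tar", ".gz", ".bz2", ".xz", ".tgz", ".tbz2", ".txz"]

def pyLegacyExts : List String := [".php", ".cgi", ".jsp", ".asp", ".aspx", ".cfm"]

-- ===== PORT A =====
def path_has_dangerous_extension_py (path : String) : Bool :=
  let p := PySem.Str.lower (PySem.Str.strip (if path = "" then "" else path))
  if PySem.Str.len p = 0 then false
  else if pyLegacyExts.any (fun ext => PySem.Str.endswith p ext) then false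
  else pyDangerousExts.any (fun ext => PySem.Str.endswith p ext)

-- ===== PORT B =====
def path_has_dangerous_extension_py_alt (path : String) : Bool :=
  let p := PySem.Str.lower (PySem.Str.strip (if path = "" then "" else path))
  if PySem.Str.len p = 0 then false
  else
    let i := PySem.Str.rfind p "."
    let ext := if 0 ≤ i then PySem.Str.slice p (some i) none else ""
    pyDangerousExts.contains ext

-- ===== PRECONDITION & SPEC =====
def Spec_path_has_dangerous_extension_py (path : String) (out : Bool) : Prop := out = path_has_dangerous_extension_py_alt path
instance (path : String) (out : Bool) : Decidable (Spec_path_has_dangerous_extension_py path out) := by unfold Spec_path_has_dangerous_extension_py; infer_instance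

-- ===== CLAIM (what is proved, stated in full; the proofs are below) =====
def Claim_equal_path_has_dangerous_extension_py : Prop := ∀ (path : String), Dom_path_has_dangerous_extension_py path → Spec_path_has_dangerous_extension_py path (path_has_dangerous_extension_py path)

-- ===== LEMMAS AND PROOFS =====

theorem prefix_single (l : List Char) (c : Char) : [c].isPrefixOf l = (l.head? == some c) := by
  cases l <;> simp [List.isPrefixOf, eq_comm]

theorem go_none (s : List Char) (c : Char) (i : Nat)
    (h : ∀ j : Nat, s[j]? ≠ some c) : PySem.Chars.rfind.go s [c] i = -1 := by
  induction i with
  | zero =>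
      rw [PySem.Chars.rfind.go]
      simp only [prefix_single, beq_iff_eq]
      rw [List.head?_eq_getElem?, if_neg (h 0)]
  | succ j ih =>
      rw [PySem.Chars.rfind.go]
      simp only [prefix_single, List.head?_drop, beq_iff_eq]
      rw [if_neg (h (j+1))]
      exact ih

theorem go_last (s : List Char) (c : Char) (i k : Nat)
    (hk : s[k]? = some c) (hki : k ≤ i)
    (hmax : ∀ j : Nat, k < j → s[j]? ≠ some c) :
    PySem.Chars.rfind.go s [c] i = (k : Int) := by
  induction i with
  | zero =>
      have hz : k = 0 := Nat.le_zero.mp hki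
      subst hz
      rw [PySem.Chars.rfind.go]
      simp only [prefix_single, beq_iff_eq]
      rw [List.head?_eq_getElem?, if_pos hk]
      simp
  | succ j ih =>
      rw [PySem.Chars.rfind.go]
      simp only [prefix_single, List.head?_drop, beq_iff_eq]
      rcases Nat.lt_or_ge k (j+1) with h | h
      · rw [if_neg (hmax (j+1) h)]
        exact ih (Nat.lt_succ_iff.mp h)
      · have hkj : k = j + 1 := Nat.le_antisymm hki h
        subst hkj
        rw [if_pos hk]

theorem rfind_no_dot (q : List Char) (h : '.' ∉ q) :
    PySem.Chars.rfind q ['.'] = -1 := by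
  unfold PySem.Chars.rfind
  exact go_none q '.' q.length (fun j hj => h (List.mem_of_getElem? hj))

theorem rfind_last_dot (u v : List Char) (hv : '.' ∉ v) :
    PySem.Chars.rfind (u ++ '.' :: v) ['.'] = (u.length : Int) := by
  unfold PySem.Chars.rfind
  apply go_last
  · rw [List.getElem?_append_right (Nat.le_refl _)]
    simp
  · simp
  · intro j hj hcontra
    rw [List.getElem?_append_right (Nat.le_of_lt hj)] at hcontra
    have hm : j - u.length = (j - u.length - 1) + 1 := by omega
    rw [hm] at hcontra
    simp only [List.getElem?_cons_succ] at hcontra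
    exact hv (List.mem_of_getElem? hcontra)

theorem endswith_false_of_no_dot (q r : List Char) (h : '.' ∉ q) :
    PySem.Chars.endswith q ('.' :: r) = false := by
  rw [Bool.eq_false_iff]
  intro hc
  exact h ((PySem.Chars.endswith_iff q ('.' :: r)).mp hc |>.subset List.mem_cons_self)

theorem suffix_dot_eq {r v : List Char} (_hr : '.' ∉ r) (hv : '.' ∉ v)
    (h : ('.' :: r) <:+ ('.' :: v)) : r = v := by
  obtain ⟨w, hw⟩ := h
  cases w with
  | nil => simpa using hw
  | cons a w' =>
      simp only [List.cons_append] at hw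
      injection hw with h1 h2
      exact absurd (h2 ▸ (by simp : ('.' : Char) ∈ w' ++ '.' :: r)) hv

theorem endswith_key (u v r : List Char) (hv : '.' ∉ v) (hr : '.' ∉ r) :
    PySem.Chars.endswith (u ++ '.' :: v) ('.' :: r) = (r == v) := by
  rw [Bool.eq_iff_iff, PySem.Chars.endswith_iff, beq_iff_eq]
  constructor
  · intro h
    rcases List.suffix_or_suffix_of_suffix h (List.suffix_append u ('.' :: v)) with hs | hs
    · exact suffix_dot_eq hr hv hs
    · exact (suffix_dot_eq hv hr hs).symm
  · rintro rfl
    exact List.suffix_append _ _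

theorem any_congr_mem {α : Type} (l : List α) (p q : α → Bool)
    (h : ∀ a ∈ l, p a = q a) : l.any p = l.any q := by
  induction l with
  | nil => rfl
  | cons a t ih =>
      simp only [List.any_cons, h a (by simp)]
      rw [ih (fun x hx => h x (by simp [hx]))]

theorem last_dot (q : List Char) (h : '.' ∈ q) :
    ∃ u v, q = u ++ '.' :: v ∧ '.' ∉ v := by
  induction q using List.reverseRecOn with
  | nil => simp at h
  | append_singleton ys x ih =>
      by_cases hx : x = '.'
      · exact ⟨ys, [], by simp [hx], by simp⟩
      · have hys : '.' ∈ ys := by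
          rcases List.mem_append.mp h with h' | h'
          · exact h'
          · simp at h'; exact absurd h'.symm hx
        obtain ⟨u, v, rfl, hv⟩ := ih hys
        exact ⟨u, v ++ [x], by simp, by
          intro hc
          rcases List.mem_append.mp hc with h' | h'
          · exact hv h'
          · simp at h'; exact hx h'.symm⟩

theorem beq_ofList (e : String) (l : List Char) :
    (e == String.ofList l) = (e.toList == l) := by
  rw [Bool.eq_iff_iff, beq_iff_eq, beq_iff_eq]
  constructor
  · rintro rfl; simp
  · intro h
    have h2 := congrArg String.ofList h
    rwa [String.ofList_toList] at h2

theorem tolist_head_cons (e : String) (h : e.toList.head? = some '.') :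
    e.toList = '.' :: e.toList.tail := by
  cases hlc : e.toList with
  | nil => rw [hlc] at h; simp at h
  | cons a t => rw [hlc] at h; simp at h; simp [h]

theorem any_endswith_no_dot (p : String) (hd : '.' ∉ p.toList) (es : List String)
    (hes : ∀ e ∈ es, e.toList.head? = some '.') :
    es.any (fun ext => PySem.Str.endswith p ext) = false := by
  rw [List.any_eq_false]
  intro e he
  rw [PySem.Str.endswith_eq, tolist_head_cons e (hes e he),
    endswith_false_of_no_dot _ _ hd]
  simp

theorem any_endswith_dot (p : String) (u v : List Char) (hq : p.toList = u ++ '.' :: v)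
    (hv : '.' ∉ v) (es : List String)
    (hes : ∀ e ∈ es, e.toList.head? = some '.' ∧ '.' ∉ e.toList.tail) :
    es.any (fun ext => PySem.Str.endswith p ext)
      = es.any (fun e => e == String.ofList ('.' :: v)) := by
  apply any_congr_mem
  intro e he
  obtain ⟨h1, h2⟩ := hes e he
  rw [PySem.Str.endswith_eq, hq, tolist_head_cons e h1, endswith_key u v _ hv h2,
    beq_ofList, tolist_head_cons e h1]
  simp

theorem core (p : String) :
    (if PySem.Str.len p = 0 then false
     else if pyLegacyExts.any (fun ext => PySem.Str.endswith p ext) then false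
     else pyDangerousExts.any (fun ext => PySem.Str.endswith p ext))
    = (if PySem.Str.len p = 0 then false
       else pyDangerousExts.contains
         (if 0 ≤ PySem.Str.rfind p "." then
            PySem.Str.slice p (some (PySem.Str.rfind p ".")) none
          else "")) := by
  by_cases hz : PySem.Str.len p = 0
  · rw [if_pos hz, if_pos hz]
  · rw [if_neg hz, if_neg hz]
    by_cases hd : '.' ∈ p.toList
    · obtain ⟨u, v, hq, hv⟩ := last_dot p.toList hd
      have hrf : PySem.Str.rfind p "." = (u.length : Int) := by
        rw [PySem.Str.rfind_eq, show (".").toList = ['.'] from rfl, hq]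
        exact rfind_last_dot u v hv
      rw [hrf, if_pos (Int.natCast_nonneg _)]
      have hext : PySem.Str.slice p (some ((u.length : Nat) : Int)) none
          = String.ofList ('.' :: v) := by
        unfold PySem.Str.slice
        rw [PySem.Chars.slice_eq_listSlice, PySem.List.slice_from_natCast, hq,
          List.drop_left]
      rw [hext,
        any_endswith_dot p u v hq hv pyLegacyExts (by decide),
        any_endswith_dot p u v hq hv pyDangerousExts (by decide),
        ← List.any_beq']
      by_cases hleg : pyLegacyExts.any (fun e => e == String.ofList ('.' :: v)) = true
      · rw [if_pos hleg]
        obtain ⟨e, he, heq⟩ := List.any_eq_true.mp hleg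
        have hev : String.ofList ('.' :: v) = e := (eq_of_beq heq).symm
        rw [hev]
        symm
        fin_cases he <;> decide
      · rw [if_neg hleg]
    · have hrf : PySem.Str.rfind p "." = -1 := by
        rw [PySem.Str.rfind_eq, show (".").toList = ['.'] from rfl]
        exact rfind_no_dot _ hd
      rw [hrf,
        any_endswith_no_dot p hd pyLegacyExts (by decide),
        any_endswith_no_dot p hd pyDangerousExts (by decide)]
      norm_num
      decide

-- ===== VERDICT (by name: the statement is the Claim_ definition above) =====
theorem path_has_dangerous_extension_py_spec : Claim_equal_path_has_dangerous_extension_py := by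
  intro path _
  show path_has_dangerous_extension_py path = path_has_dangerous_extension_py_alt path
  exact core (PySem.Str.lower (PySem.Str.strip (if path = "" then "" else path)))
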